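-- pv_equiv track=rewrite | github.com/SohailBright/Bot-telegram | bot.py | check_content
-- ===== SOURCE A (Python) =====
-- BAD_WORDS = ["sex", "nude", "porn", "xxx", "dick", "pussy", "chut", "lund", "rand", "boobs", "fuck", "bhosdike", "madarchod", "behenchod", "gaand"]
--
-- def check_content(text):
--     """Check for bad words or links"""
--     text_lower = text.lower()
--
--     if 'http://' in text_lower or 'https://' in text_lower or 't.me/' in text_lower or 'www.' in text_lower or '.com' in text_lower or '.in' in text_lower:
--         return "link"
--
--     for word in BAD_WORDS:
--         if word in text_lower:
--             return "bad_word"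
--
--     return "ok"
-- ===== SOURCE B (Python) =====
-- BAD_WORDS = ["sex", "nude", "porn", "xxx", "dick", "pussy", "chut", "lund", "rand", "boobs", "fuck", "bhosdike", "madarchod", "behenchod", "gaand"]
--
-- LINK_MARKERS = ("http://", "https://", "t.me/", "www.", ".com", ".in")
-- BAD_TUPLE = tuple(BAD_WORDS)
--
-- def check_content(text):
--     """Check for bad words or links (single left-to-right scan over positions)"""
--     t = text.lower()
--     has_link = False
--     has_bad = False
--     for i in range(len(t)):
--         has_link = has_link or t.startswith(LINK_MARKERS, i)
--         has_bad = has_bad or t.startswith(BAD_TUPLE, i)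
--     if has_link:
--         return "link"
--     if has_bad:
--         return "bad_word"
--     return "ok"
-- ===== Notes on version B (the rewrite author's own statement) =====
-- stated objective: alternative
-- what changed: Replaces the six separate substring-containment scans plus the early-return bad-word loop by a single left-to-right scan over text positions that accumulates two booleans (link seen, bad word seen) via per-position prefix tests, deciding at the end.
import Mathlib
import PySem

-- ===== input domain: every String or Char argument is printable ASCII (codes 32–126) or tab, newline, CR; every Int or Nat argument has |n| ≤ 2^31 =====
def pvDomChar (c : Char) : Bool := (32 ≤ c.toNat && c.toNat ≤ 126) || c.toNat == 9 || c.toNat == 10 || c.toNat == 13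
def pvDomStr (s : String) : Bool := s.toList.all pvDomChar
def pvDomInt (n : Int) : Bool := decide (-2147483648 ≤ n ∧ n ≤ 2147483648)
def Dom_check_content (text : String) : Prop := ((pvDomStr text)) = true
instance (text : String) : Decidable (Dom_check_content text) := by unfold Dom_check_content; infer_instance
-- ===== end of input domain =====

-- B replaces A's per-pattern full substring scans and early-return word loop by one
-- left-to-right scan over positions accumulating two booleans (objective: alternative).

-- ===== PORT A =====
def BAD_WORDS : List String :=
  ["sex", "nude", "porn", "xxx", "dick", "pussy", "chut", "lund", "rand",
   "boobs", "fuck", "bhosdike", "madarchod", "behenchod", "gaand"]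

-- A's 'for word in BAD_WORDS: if word in text_lower: return "bad_word"' loop
def badWordLoop (t : String) : List String → String
  | [] => "ok"
  | w :: ws => if PySem.Str.isIn w t then "bad_word" else badWordLoop t ws

def check_content (text : String) : String :=
  let text_lower := PySem.Str.lower text
  if PySem.Str.isIn "http://" text_lower || PySem.Str.isIn "https://" text_lower ||
     PySem.Str.isIn "t.me/" text_lower || PySem.Str.isIn "www." text_lower ||
     PySem.Str.isIn ".com" text_lower || PySem.Str.isIn ".in" text_lower then
    "link"
  else
    badWordLoop text_lower BAD_WORDS

-- ===== PORT B =====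
def LINK_MARKERS : List String := ["http://", "https://", "t.me/", "www.", ".com", ".in"]

def check_content_alt (text : String) : String :=
  let t := (PySem.Str.lower text).toList
  let st := (List.range t.length).foldl
    (fun (st : Bool × Bool) i =>
      ( st.1 || LINK_MARKERS.any (fun m => PySem.Chars.startswith (t.drop i) m.toList),
        st.2 || BAD_WORDS.any (fun w => PySem.Chars.startswith (t.drop i) w.toList) ))
    (false, false)
  if st.1 then "link" else if st.2 then "bad_word" else "ok"

-- ===== PRECONDITION & SPEC =====
def Spec_check_content (text : String) (out : String) : Prop := out = check_content_alt text
instance (text : String) (out : String) : Decidable (Spec_check_content text out) := by unfold Spec_check_content; infer_instance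

-- ===== CLAIM (what is proved, stated in full; the proofs are below) =====
def Claim_equal_check_content : Prop := ∀ (text : String), Dom_check_content text → Spec_check_content text (check_content text)

-- ===== LEMMAS AND PROOFS =====

-- the paired or-accumulating fold computes the pair of 'any's
theorem scan_foldl_eq {ι : Type} (F G : ι → Bool) :
    ∀ (l : List ι) (b1 b2 : Bool),
      (l.foldl (fun (st : Bool × Bool) i => (st.1 || F i, st.2 || G i)) (b1, b2))
        = (b1 || l.any F, b2 || l.any G) := by
  intro l
  induction l with
  | nil => simp
  | cons x xs ih =>
    intro b1 b2
    simp [List.foldl_cons, ih, Bool.or_assoc]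

-- 'any' distributes over a pointwise disjunction
theorem any_or_distrib {ι : Type} (l : List ι) (F G : ι → Bool) :
    l.any (fun i => F i || G i) = (l.any F || l.any G) := by
  induction l with
  | nil => simp
  | cons x xs ih => cases hF : F x <;> cases hG : G x <;> simp [List.any_cons, ih, hF, hG]

-- a position-wise prefix search over range equals substring containment (nonempty pattern)
theorem any_range_startswith_eq_isIn (sub t : List Char) (h : sub ≠ []) :
    (List.range t.length).any (fun i => PySem.Chars.startswith (t.drop i) sub)
      = PySem.Chars.isIn sub t := by
  by_cases hin : PySem.Chars.isIn sub t = true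
  · rw [hin]
    obtain ⟨j, hj⟩ := (PySem.Chars.exists_prefix_drop_iff_isIn sub t).2 hin
    have hjlt : j < t.length := by
      by_contra hge
      rw [List.drop_eq_nil_of_le (Nat.le_of_not_lt hge)] at hj
      exact h (List.prefix_nil.mp hj)
    simp only [List.any_eq_true]
    exact ⟨j, List.mem_range.mpr hjlt, (PySem.Chars.startswith_iff _ _).2 hj⟩
  · rw [Bool.eq_false_iff.mpr hin]
    simp only [List.any_eq_false]
    intro i _ hs
    exact hin ((PySem.Chars.exists_prefix_drop_iff_isIn sub t).1
      ⟨i, (PySem.Chars.startswith_iff _ _).1 hs⟩)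

-- A's bad-word loop in terms of 'any'
theorem badWordLoop_eq (t : String) :
    ∀ ws : List String,
      badWordLoop t ws = if ws.any (fun w => PySem.Str.isIn w t) then "bad_word" else "ok" := by
  intro ws
  induction ws with
  | nil => simp [badWordLoop]
  | cons w ws ih =>
    unfold badWordLoop
    rw [ih]
    by_cases hw : PySem.Chars.isIn w.toList t.toList = true
    · simp [hw]
    · simp [hw]

-- the positionwise scan of a list of nonempty patterns equals the per-pattern containment tests
theorem scan_any_eq (text : String) :
    ∀ (ms : List String), (∀ x ∈ ms, x.toList ≠ []) →
      (List.range (PySem.Str.lower text).toList.length).any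
        (fun i => ms.any (fun m =>
          PySem.Chars.startswith ((PySem.Str.lower text).toList.drop i) m.toList))
        = ms.any (fun m => PySem.Str.isIn m (PySem.Str.lower text)) := by
  intro ms
  induction ms with
  | nil => simp
  | cons m rest ih =>
    intro hne
    have hm : m.toList ≠ [] := hne m (List.mem_cons_self ..)
    simp only [List.any_cons]
    rw [any_or_distrib, any_range_startswith_eq_isIn _ _ hm,
        ih (fun x hx => hne x (List.mem_cons_of_mem _ hx))]
    simp

-- ===== VERDICT (by name: the statement is the Claim_ definition above) =====
theorem check_content_spec : Claim_equal_check_content := by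
  intro text _
  unfold Spec_check_content check_content check_content_alt
  simp only [scan_foldl_eq, Bool.false_or]
  rw [scan_any_eq text LINK_MARKERS (by decide), scan_any_eq text BAD_WORDS (by decide),
      badWordLoop_eq]
  simp [LINK_MARKERS, List.any_cons, Bool.or_assoc]
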